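-- pv_equiv track=rewrite | github.com/loning/mbook-binary | src/binaryuniverse/tests/test_L1_9_quantum_classical_transition.py | _check_no11
-- ===== SOURCE A (Python) =====
-- def _check_no11(indices: frozenset) -> bool:
--     """Check No-11 constraint"""
--     if not indices:
--         return True
--     sorted_indices = sorted(indices)
--     for i in range(len(sorted_indices) - 1):
--         if sorted_indices[i+1] - sorted_indices[i] == 1:
--             return False
--     return True
-- ===== SOURCE B (Python) =====
-- def _check_no11(indices: frozenset) -> bool:
--     """Check No-11 constraint"""
--     return not any(i + 1 in indices for i in indices)
-- ===== Notes on version B (the rewrite author's own statement) =====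
-- stated objective: simpler
-- what changed: Replaced the sort-then-adjacent-scan with a direct membership probe: return not any(i+1 in indices for i in indices); the sorting pass and the consecutive-pair loop disappear.
import Mathlib
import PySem

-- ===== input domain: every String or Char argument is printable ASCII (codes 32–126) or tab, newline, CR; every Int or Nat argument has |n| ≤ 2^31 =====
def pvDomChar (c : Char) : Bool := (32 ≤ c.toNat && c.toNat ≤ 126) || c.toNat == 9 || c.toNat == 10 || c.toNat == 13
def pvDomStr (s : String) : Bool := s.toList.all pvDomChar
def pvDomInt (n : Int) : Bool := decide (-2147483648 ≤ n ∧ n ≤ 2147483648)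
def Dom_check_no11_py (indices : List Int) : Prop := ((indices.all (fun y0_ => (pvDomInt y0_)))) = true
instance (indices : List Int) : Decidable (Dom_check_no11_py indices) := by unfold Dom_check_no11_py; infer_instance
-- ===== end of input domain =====

-- B drops the sort and the adjacent-pair scan, probing set membership of each successor directly (simpler).

-- ===== PORT A =====
def check_no11_py (indices : List Int) : Bool :=
  if indices = [] then true
  else
    let s := PySem.List.sorted indices (fun x => x) false
    if (PySem.List.pyRange 0 ((s.length : Int) - 1) 1).any
        (fun i => PySem.List.pyGetD s (i + 1) 0 - PySem.List.pyGetD s i 0 == 1)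
    then false else true

-- ===== PORT B =====
def check_no11_py_alt (indices : List Int) : Bool :=
  !(indices.any (fun i => indices.contains (i + 1)))

-- ===== PRECONDITION & SPEC =====
def Spec_check_no11_py (indices : List Int) (out : Bool) : Prop := out = check_no11_py_alt indices
instance (indices : List Int) (out : Bool) : Decidable (Spec_check_no11_py indices out) := by unfold Spec_check_no11_py; infer_instance

-- ===== CLAIM (what is proved, stated in full; the proofs are below) =====
def Claim_equal_check_no11_py : Prop := ∀ (indices : List Int), Dom_check_no11_py indices → Spec_check_no11_py indices (check_no11_py indices)

-- ===== LEMMAS AND PROOFS =====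

/-- An adjacent pair differing by exactly 1 exists somewhere in the list. -/
def hasAdj : List Int → Bool
  | a :: b :: t => (b - a == 1) || hasAdj (b :: t)
  | _ => false

theorem hasAdj_iff_exists (s : List Int) :
    hasAdj s = true ↔ ∃ k, ∃ h : k + 1 < s.length, s[k + 1] - s[k] = 1 := by
  induction s with
  | nil => simp [hasAdj]
  | cons a t ih =>
    cases t with
    | nil => simp [hasAdj]
    | cons b t' =>
      simp only [hasAdj, Bool.or_eq_true, beq_iff_eq, ih]
      constructor
      · rintro (h | ⟨k, hk, hd⟩)
        · exact ⟨0, by simp, by simpa using h⟩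
        · exact ⟨k + 1, by simpa using hk, by simpa using hd⟩
      · rintro ⟨k, hk, hd⟩
        cases k with
        | zero => left; simpa using hd
        | succ k => right; exact ⟨k, by simpa using hk, by simpa using hd⟩

/-- In a ≤-sorted list containing both x and x+1, some adjacent pair differs by 1. -/
theorem hasAdj_of_mem (s : List Int) (hs : s.Pairwise (· ≤ ·)) (x : Int)
    (hx : x ∈ s) (hx1 : x + 1 ∈ s) : hasAdj s = true := by
  induction s with
  | nil => simp at hx
  | cons a t ih =>
    have ha : ∀ y ∈ t, a ≤ y := fun y hy => (List.pairwise_cons.mp hs).1 y hy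
    have ht : t.Pairwise (· ≤ ·) := (List.pairwise_cons.mp hs).2
    cases t with
    | nil =>
      simp only [List.mem_cons, List.not_mem_nil, or_false] at hx hx1
      omega
    | cons b t' =>
      have hstep : hasAdj (b :: t') = true → hasAdj (a :: b :: t') = true := by
        intro h; simp [hasAdj, h]
      rcases List.mem_cons.mp hx with hxa | hxt
      · -- x = a; a+1 ∈ b :: t'
        subst hxa
        have hx1t : x + 1 ∈ b :: t' := by
          rcases List.mem_cons.mp hx1 with h | h
          · omega
          · exact h
        have hb_le : b ≤ x + 1 := by
          rcases List.mem_cons.mp hx1t with h | h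
          · omega
          · exact ((List.pairwise_cons.mp ht).1 _ h)
        have hxb : x ≤ b := ha b (by simp)
        have hcase : b = x ∨ b = x + 1 := by omega
        rcases hcase with hb | hb
        · subst hb
          exact hstep (ih ht (by simp) hx1t)
        · subst hb
          simp [hasAdj]
      · rcases List.mem_cons.mp hx1 with hxa1 | hx1t
        · -- x + 1 = a but x ∈ t, contradicting a ≤ x
          have := ha x hxt; omega
        · exact hstep (ih ht hxt hx1t)

/-- Forward: an adjacent pair differing by 1 yields x, x+1 both in the list. -/
theorem exists_of_hasAdj (s : List Int) (h : hasAdj s = true) :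
    ∃ x ∈ s, x + 1 ∈ s := by
  rcases (hasAdj_iff_exists s).mp h with ⟨k, hk, hd⟩
  refine ⟨s[k], List.getElem_mem _, ?_⟩
  have : s[k] + 1 = s[k + 1] := by omega
  rw [this]; exact List.getElem_mem _

/-- A's indexed loop over the sorted list computes exactly hasAdj. -/
theorem anyAdj_eq_hasAdj (s : List Int) :
    ((PySem.List.pyRange 0 ((s.length : Int) - 1) 1).any
      (fun i => PySem.List.pyGetD s (i + 1) 0 - PySem.List.pyGetD s i 0 == 1)) = hasAdj s := by
  rw [← Bool.coe_iff_coe]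
  simp only [List.any_eq_true, PySem.List.mem_pyRange_one, beq_iff_eq, hasAdj_iff_exists]
  constructor
  · rintro ⟨i, ⟨h0, hi⟩, hd⟩
    have hlt : i.toNat + 1 < s.length := by omega
    refine ⟨i.toNat, hlt, ?_⟩
    rw [PySem.List.pyGetD_eq_getElem s (i := i + 1) 0 (by omega) (by omega),
        PySem.List.pyGetD_eq_getElem s (i := i) 0 h0 (by omega)] at hd
    simp only [show (i + 1).toNat = i.toNat + 1 by omega] at hd
    exact hd
  · rintro ⟨k, hk, hd⟩
    refine ⟨(k : Int), ⟨by omega, by omega⟩, ?_⟩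
    rw [PySem.List.pyGetD_eq_getElem s (i := (k : Int) + 1) 0 (by omega) (by omega),
        PySem.List.pyGetD_eq_getElem s (i := (k : Int)) 0 (by omega) (by omega)]
    simp only [show ((k : Int) + 1).toNat = k + 1 by omega, show ((k : Int)).toNat = k by omega]
    exact hd

-- ===== VERDICT (by name: the statement is the Claim_ definition above) =====
theorem check_no11_py_spec : Claim_equal_check_no11_py := by
  intro indices _
  unfold Spec_check_no11_py check_no11_py check_no11_py_alt
  by_cases hnil : indices = []
  · simp [hnil]
  · simp only [hnil, if_false]
    set s := PySem.List.sorted indices (fun x => x) false with hs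
    rw [anyAdj_eq_hasAdj]
    have hmem : ∀ x : Int, x ∈ s ↔ x ∈ indices := fun x => PySem.List.mem_sorted indices (fun x => x) false x
    have key : hasAdj s = indices.any (fun i => indices.contains (i + 1)) := by
      rw [← Bool.coe_iff_coe]
      simp only [List.any_eq_true, List.contains_eq_mem, decide_eq_true_eq]
      constructor
      · intro h
        rcases exists_of_hasAdj s h with ⟨x, hx, hx1⟩
        exact ⟨x, (hmem x).mp hx, (hmem (x + 1)).mp hx1⟩
      · rintro ⟨x, hx, hx1⟩
        exact hasAdj_of_mem s (by simpa using PySem.List.sorted_pairwise indices (fun x => x)) x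
          ((hmem x).mpr hx) ((hmem (x + 1)).mpr hx1)
    rw [key]
    cases indices.any (fun i => indices.contains (i + 1)) <;> simp
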